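-- pv_equiv track=rewrite | github.com/Bouer/WordGame_python | WordGame.py | es_palabra_valida
-- ===== SOURCE A (Python) =====
-- def es_palabra_valida(palabra, mano, lista_palabras):
-- #En Python, cuando no se necesita utilizar el valor de una variable en un bucle,
-- #es común usar el guion bajo (_) como nombre de variable.
-- #En este caso, el guion bajo se utiliza porque no necesitamos utilizar
-- #el valor de la variable en cada iteración.
--     lista_mano = [letra  for letra, cantidad in mano.items() for _ in range(cantidad)]
--     lista_mano_copy = lista_mano.copy()  # Crear una copia de la lista mano
--
--     palabra_min = palabra.lower()
--     palabra_sin_asterisco = ""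
--
--
--     if "*" in palabra_min:
--         palabras_reemplazadas = [palabra_min.replace("*", vocal) for vocal in "aeiou"]
--
--
--         for palabra_asterisco in palabras_reemplazadas:
--             if palabra_asterisco in lista_palabras:
--
--                 palabra_sin_asterisco = palabra_asterisco
--
--                 break
--     else:
--
--         palabra_sin_asterisco = palabra_min
--
--
--
--
--
--     puede_formar_palabra = True
--
--
--     if palabra_sin_asterisco in lista_palabras:
--
--
--         for letra in palabra_min:
--             if letra in lista_mano_copy:
--
--                 lista_mano_copy.remove(letra)  # Eliminar la letra de la lista mano
--
--             else:
--                 puede_formar_palabra = False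
--
--                 break
--         if puede_formar_palabra:
--
--             return True
--         else:
--
--             return False
--     else:
--         return False
--
--
--
--     """
--     Devuelve True si la palabra está en lista_palabras y está compuesta
--     completamente por letras en la mano. Sino, devuelve False.
--     No se debe modificar ni mano ni lista_palabras.
--
--     palabra: string
--     mano: diccionario (string -> int)
--     lista_palabras: lista de cadenas en minúsculas
--     Retorna: boolean
--     """
-- ===== SOURCE B (Python) =====
-- def es_palabra_valida(palabra, mano, lista_palabras):
--     palabra_min = palabra.lower()
--     if "*" in palabra_min:
--         reemplazos = (palabra_min.replace("*", vocal) for vocal in "aeiou")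
--         palabra_sin_asterisco = next((p for p in reemplazos if p in lista_palabras), "")
--     else:
--         palabra_sin_asterisco = palabra_min
--     if palabra_sin_asterisco not in lista_palabras:
--         return False
--     necesidades = {}
--     for letra in palabra_min:
--         necesidades[letra] = necesidades.get(letra, 0) + 1
--     return all(n <= mano.get(letra, 0) for letra, n in necesidades.items())
-- ===== Notes on version B (the rewrite author's own statement) =====
-- stated objective: simpler
-- what changed: Instead of expanding the hand dict into a letter list and removing letters one at a time (a quadratic scan-and-remove loop), B counts the needed letters in one pass over the word and compares each count against the hand's count; the asterisk resolution and the word-list guard are kept.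
import Mathlib
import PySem

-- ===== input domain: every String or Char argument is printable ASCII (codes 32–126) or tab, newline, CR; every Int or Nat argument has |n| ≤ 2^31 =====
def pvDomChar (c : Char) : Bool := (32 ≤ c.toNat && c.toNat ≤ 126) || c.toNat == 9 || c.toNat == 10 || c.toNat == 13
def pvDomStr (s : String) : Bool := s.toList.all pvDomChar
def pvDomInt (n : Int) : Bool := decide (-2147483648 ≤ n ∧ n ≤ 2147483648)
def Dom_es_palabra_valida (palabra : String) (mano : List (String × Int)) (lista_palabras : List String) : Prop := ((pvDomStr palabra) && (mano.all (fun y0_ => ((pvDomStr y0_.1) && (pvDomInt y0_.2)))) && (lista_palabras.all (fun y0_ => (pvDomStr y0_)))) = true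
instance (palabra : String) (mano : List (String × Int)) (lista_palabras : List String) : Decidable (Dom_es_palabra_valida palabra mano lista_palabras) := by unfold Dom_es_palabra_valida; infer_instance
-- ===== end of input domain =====

-- B replaces A's expand-the-hand-and-remove-letters-one-by-one check by a single needed-letter
-- counter compared against the hand's counts (objective: simpler; the asterisk resolution and the
-- word-list guard are kept, as they determine the result).

-- ===== PORT A =====

-- A: 'for palabra_asterisco in palabras_reemplazadas: if … in lista_palabras: …; break' with initial ""
def pvFindAst : List String → List String → String
  | [], _ => ""
  | w :: ws, lista => if w ∈ lista then w else pvFindAst ws lista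

-- A: 'for letra in palabra_min: if letra in lista_mano_copy: lista_mano_copy.remove(letra) else: break'
def pvQuitar : List Char → List String → Bool
  | [], _ => true
  | c :: rest, hand =>
    match PySem.List.remove? hand (String.ofList [c]) with
    | some hand' => pvQuitar rest hand'
    | none => false

def es_palabra_valida (palabra : String) (mano : List (String × Int)) (lista_palabras : List String) : Bool :=
  let d := PySem.Dict.ofList mano
  let lista_mano := d.items.flatMap (fun p => (PySem.List.pyRange 0 p.2 1).map (fun _ => p.1))
  let palabra_min := PySem.Str.lower palabra
  let palabra_sin_asterisco :=
    if PySem.Str.isIn "*" palabra_min then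
      pvFindAst ("aeiou".toList.map (fun v => PySem.Str.replace palabra_min "*" (String.ofList [v]))) lista_palabras
    else palabra_min
  if palabra_sin_asterisco ∈ lista_palabras then
    pvQuitar palabra_min.toList lista_mano
  else false

-- ===== PORT B =====

def es_palabra_valida_alt (palabra : String) (mano : List (String × Int)) (lista_palabras : List String) : Bool :=
  let d := PySem.Dict.ofList mano
  let palabra_min := PySem.Str.lower palabra
  let palabra_sin_asterisco :=
    if PySem.Str.isIn "*" palabra_min then
      (("aeiou".toList.map (fun v => PySem.Str.replace palabra_min "*" (String.ofList [v]))).find?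
        (fun w => decide (w ∈ lista_palabras))).getD ""
    else palabra_min
  if palabra_sin_asterisco ∉ lista_palabras then false
  else
    -- necesidades[letra] = necesidades.get(letra, 0) + 1 over palabra_min
    let necesidades := palabra_min.toList.foldl
      (fun n c => n.insert c (n.getD c 0 + 1)) (PySem.Dict.empty : PySem.Dict Char Int)
    necesidades.items.all (fun p => decide (p.2 ≤ d.getD (String.ofList [p.1]) 0))

-- ===== PRECONDITION & SPEC =====
def Spec_es_palabra_valida (palabra : String) (mano : List (String × Int)) (lista_palabras : List String) (out : Bool) : Prop := out = es_palabra_valida_alt palabra mano lista_palabras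
instance (palabra : String) (mano : List (String × Int)) (lista_palabras : List String) (out : Bool) : Decidable (Spec_es_palabra_valida palabra mano lista_palabras out) := by unfold Spec_es_palabra_valida; infer_instance

-- ===== CLAIM (what is proved, stated in full; the proofs are below) =====
def Claim_equal_es_palabra_valida : Prop := ∀ (palabra : String) (mano : List (String × Int)) (lista_palabras : List String), Dom_es_palabra_valida palabra mano lista_palabras → Spec_es_palabra_valida palabra mano lista_palabras (es_palabra_valida palabra mano lista_palabras)

-- ===== LEMMAS AND PROOFS =====

-- the two asterisk resolutions (for-loop with break vs find?) agree
theorem pvFindAst_eq_find? (ws lista : List String) :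
    pvFindAst ws lista = (ws.find? (fun w => decide (w ∈ lista))).getD "" := by
  induction ws with
  | nil => rfl
  | cons w ws ih =>
      by_cases h : w ∈ lista <;> simp [pvFindAst, List.find?, h, ih]

theorem mk_singleton_injective : Function.Injective (fun c => String.ofList [c]) := by
  intro a b h
  have := congrArg String.toList h
  simpa using this

-- glue: a ::ₘ s ≤ t ↔ a ∈ t ∧ s ≤ t.erase a
theorem multiset_cons_le {α : Type} [DecidableEq α] (a : α) (s t : Multiset α) :
    a ::ₘ s ≤ t ↔ a ∈ t ∧ s ≤ t.erase a := by
  constructor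
  · intro h
    refine ⟨Multiset.mem_of_le h (Multiset.mem_cons_self a s), ?_⟩
    simpa using Multiset.erase_le_erase a h
  · rintro ⟨hm, hs⟩
    calc a ::ₘ s ≤ a ::ₘ t.erase a := Multiset.cons_le_cons a hs
      _ = t := Multiset.cons_erase hm

-- A's remove loop succeeds exactly when the word's letters form a sub-multiset of the hand
theorem pvQuitar_eq_multiset (cs : List Char) (hand : List String) :
    pvQuitar cs hand
      = decide ((cs.map (fun c => String.ofList [c]) : Multiset String) ≤ (hand : Multiset String)) := by
  induction cs generalizing hand with
  | nil => simp [pvQuitar]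
  | cons c rest ih =>
      by_cases h : String.ofList [c] ∈ hand
      · rw [pvQuitar, PySem.List.remove?_eq_some_erase _ _ h]
        rw [show (match some (hand.erase (String.ofList [c])) with
            | some hand' => pvQuitar rest hand' | none => false) = pvQuitar rest (hand.erase (String.ofList [c])) from rfl]
        rw [ih, decide_eq_decide, List.map_cons, ← Multiset.cons_coe, multiset_cons_le, ← Multiset.coe_erase]
        simp [h]
      · rw [pvQuitar, (PySem.List.remove?_eq_none_iff _ _).2 h, List.map_cons, ← Multiset.cons_coe]
        have : ¬ (String.ofList [c] ::ₘ (rest.map (fun c => String.ofList [c]) : Multiset String) ≤ (hand : Multiset String)) := by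
          intro hle
          exact h (Multiset.mem_coe.1 (Multiset.mem_of_le hle (Multiset.mem_cons_self _ _)))
        simpa using this

-- the hand expanded by A has, for each single-letter string, exactly the dict's count (clamped at 0)
theorem count_expand (L : List (String × Int)) (hnd : (L.map Prod.fst).Nodup) (s : String) :
    (L.flatMap (fun p => List.replicate p.2.toNat p.1)).count s
      = ((PySem.Dict.mk L).getD s 0).toNat := by
  induction L with
  | nil => simp [PySem.Dict.getD, PySem.Dict.get?]
  | cons p L ih =>
      obtain ⟨k, v⟩ := p
      simp only [List.map_cons, List.nodup_cons] at hnd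
      rw [List.flatMap_cons, List.count_append, List.count_replicate,
        PySem.Dict.getD_eq_get?_getD, PySem.Dict.get?_mk_cons]
      by_cases hks : k = s
      · subst hks
        have hz : (L.flatMap (fun p => List.replicate p.2.toNat p.1)).count k = 0 := by
          rw [List.count_eq_zero]
          intro hm
          simp only [List.mem_flatMap, List.mem_replicate] at hm
          obtain ⟨q, hq, _, rfl⟩ := hm
          exact hnd.1 (List.mem_map_of_mem hq)
        simp [hz]
      · have hih := ih hnd.2
        rw [PySem.Dict.getD_eq_get?_getD] at hih
        simp [hks, hih, beq_iff_eq]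

-- the two formability conditions agree
theorem cond_equiv (cs : List Char) (L : List (String × Int)) (hnd : (L.map Prod.fst).Nodup) :
    pvQuitar cs (L.flatMap (fun p => List.replicate p.2.toNat p.1))
      = (PySem.Dict.counter cs).items.all (fun p => decide (p.2 ≤ (PySem.Dict.mk L).getD (String.ofList [p.1]) 0)) := by
  rw [pvQuitar_eq_multiset, PySem.Dict.items_counter, Bool.eq_iff_iff]
  simp only [List.all_map, List.all_eq_true, Function.comp_def, decide_eq_true_eq]
  rw [Multiset.le_iff_count]
  simp only [Multiset.coe_count]
  constructor
  · intro h c hc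
    have hcnt := h (String.ofList [c])
    rw [List.count_map_of_injective _ _ mk_singleton_injective, count_expand L hnd] at hcnt
    have hpos : 0 < cs.count c := List.count_pos_iff.2 (((PySem.List.mem_dedup _ _).1 (by simpa using hc)))
    omega
  · intro h s
    by_cases hs : ∃ c ∈ cs, s = String.ofList [c]
    · obtain ⟨c, hc, rfl⟩ := hs
      have hle := h c (by simpa using (PySem.List.mem_dedup _ _).2 hc)
      rw [List.count_map_of_injective _ _ mk_singleton_injective, count_expand L hnd]
      have hpos : 0 < cs.count c := List.count_pos_iff.2 hc
      omega
    · have hz : (cs.map (fun c => String.ofList [c])).count s = 0 := by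
        rw [List.count_eq_zero]
        intro hm
        obtain ⟨c, hc, rfl⟩ := List.mem_map.1 hm
        exact hs ⟨c, hc, rfl⟩
      omega

-- A's hand expansion, pointwise: range-of-count of a constant is replicate
theorem expand_fun : (fun p : String × Int => (PySem.List.pyRange 0 p.2 1).map (fun _ => p.1))
    = (fun p : String × Int => List.replicate p.2.toNat p.1) := by
  funext p
  simp [PySem.List.pyRange_one, List.map_map, Function.comp_def, List.map_const']

-- ===== VERDICT (by name: the statement is the Claim_ definition above) =====
theorem es_palabra_valida_spec : Claim_equal_es_palabra_valida := by
  intro palabra mano lista_palabras _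
  unfold Spec_es_palabra_valida es_palabra_valida es_palabra_valida_alt
  simp only [pvFindAst_eq_find?, PySem.Dict.foldl_insert_getD_add_one_eq_counter, expand_fun]
  set psa := if PySem.Str.isIn "*" (PySem.Str.lower palabra) then
      (("aeiou".toList.map (fun v => PySem.Str.replace (PySem.Str.lower palabra) "*" (String.ofList [v]))).find?
        (fun w => decide (w ∈ lista_palabras))).getD ""
    else PySem.Str.lower palabra with hpsa
  by_cases hmem : psa ∈ lista_palabras
  · rw [if_pos hmem, if_neg (not_not_intro hmem)]
    exact cond_equiv _ _ (PySem.Dict.nodup_keys_ofList mano)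
  · rw [if_neg hmem, if_pos hmem]
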